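/- GENERATED by tools/from_farm_form.py from prooffarm-gif/accepted/digest_map.2/Proof.lean (a worked proof of the farm's unit `digest_map.2`,
   accepted by the verdict) — do not edit. -/
import Gif.Spec.Units.digest_map_2
import Gif.Spec.AllSegs

open X86 X86.User Asan ProgX.Base ProgX.Base.Spec Gif.Spec

set_option maxRecDepth 4000
set_option maxHeartbeats 4000000

/-- Segment 2 of `digest_map` (105553H … 105558H, 1054F5H … 105553H; gif_driver.c:121-125): ONE ROUND of the colour loop, from `Head k`.
`cmp r14d, r12d ; jg` not taken (`i ≥ ColorCount`): `Done`, nothing stored. Taken (`i < ColorCount`): the checked load of `map->Colors`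
(inside the map object `(mp.obj, 24)`), `rbx = Colors + 3·i`, the three checked byte loads at `rbx + 0, 1, 2` (inside the colour array
`(mp.colors, 3 · mp.count)`: `3·i + 2 < 3 · mp.count`), each followed by `digest_byte` (its post: the memory is the one at its entry);
`i++`: `Head (k − 1)`. The only stores are the seven return addresses at `[RA − 48, RA − 40)`: `At` is carried by `digest_map.At.carry`
(Gif/Spec/DriverCarry.lean). THE MODEL OF A LOOP-BODY SEGMENT: the loop is the COMPOSITION's (strong induction on the measure); the
unit proves one round, `Head k` to `Head k'` with `k' < k`, or to the exit. No Lemmas.lean: every lemma is the tree's.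
    BLOCKS: 1 the prelude of a segment (the assertion taken apart, `v_entry`, the walker's names)
            2 the registers as EQUATIONS (`Word.eq_ofNat_of_toNat`), the field the segment loads as a FACT in the walker's form
            3 the walk; a check = `LiveIn.accSmall`; the branch fact as numbers by `cnt32_slt_iff`
            4 behind each leaf call (post `v.mem = u.mem`): `w_mem` restated, then straight code again
            5 the two exits: `hun`, `hsame`, `habi`, `hat.carry`; the loop clauses -/
theorem Gif.Spec.Proved.digest_map_2_ok : Gif.Spec.digest_map_2.Statement := by
  intro Lay hLay μ hμ u₀ hcode h_byte h_load8 h_load1 H rest frames m e ret k v hhead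
  obtain ⟨hat, mp, hm, h_r13, hmap, h_r14, h_r12, hk⟩ := hhead
  subst hm
  -- 1. THE PRELUDE OF A SEGMENT: the assertion taken apart, the entry, the pre
  have he := hat.entry
  v_entry he
  obtain ⟨hp, _, howns⟩ := hat.pre
  have hbase := hp.base
  have hok := hat.inv.heap
  -- where the two objects of the map are (numbers: the walker places the loads with them), and that they are live
  obtain ⟨hobj1, hobj2, hcol1, hcol2⟩ := howns.map_inside hok hbase
  have hlo : LiveIn (H.liveObjs ++ rest) frames mp.obj 24 := howns.map_obj_liveIn rest frames
  have hlc : LiveIn (H.liveObjs ++ rest) frames mp.colors (3 * mp.count) := howns.map_colors_liveIn rest frames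
  have hmap0 := hmap
  obtain ⟨_, _, hcolors, hcnt1, hcnt256⟩ := hmap
  -- the present state, in the walker's names
  have w_rip := hat.rip
  have c_rsp : v.reg .rsp = e.reg .rsp - 40 := hat.rsp
  have w_eq : Mem.EqOn ProgX.Base.L.textLo ProgX.Base.L.textHi u₀.mem v.mem := ProgX.Base.conv_code_eqOn hat.code
  have hdf : v.flags .df = false := (show abiInv _ from hat.abi).1
  have hmx : v.mxcsr &&& 0x1F80 = 0x1F80 := (show abiInv _ from hat.abi).2
  have hsse := ProgX.Base.sseOK_of_abiInv hat.abi
  have w_kept : RegsKept [.rsp] v v := RegsKept.refl _ _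
  -- 2. THE REGISTERS AS EQUATIONS (`Head` states them as numbers), AND THE FIELD THE SEGMENT LOADS AS A FACT in the walker's form
  obtain ⟨i, h_i⟩ : ∃ i, (v.reg .r12).toNat = i := ⟨_, rfl⟩
  rw [h_i] at h_r12 hk
  have c_r12 : v.reg .r12 = UInt64.ofNat i := Word.eq_ofNat_of_toNat h_i
  have c_r13 : v.reg .r13 = UInt64.ofNat mp.obj := Word.eq_ofNat_of_toNat h_r13
  have c_r14 : v.reg .r14 = UInt64.ofNat mp.count := Word.eq_ofNat_of_toNat h_r14
  simp only [gfield] at hcolors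
  have l_colors : v.mem.readLE (UInt64.ofNat mp.obj + 0x10) 8 = mp.colors := by
    rw [rd_eq_readLE v.mem _ (mp.obj + 16) 8 (by u_omega)]
    exact hcolors
  have hi31 : i < 2 ^ 31 := by omega
  have hcnt31 : mp.count < 2 ^ 31 := by omega
  -- 3. THE WALK, to both exit cuts (`cnt32_sext`: `movsxd rax, r12d` is `UInt64.ofNat i`; facts rewrite steps, NOT the branch fact)
  u_walk hcode [hμ.vendor, Gif.Spec.cnt32_sext i hi31]
    until [Gif.L.digest_map.at_105553, Gif.L.digest_map.at_105558]
    span [ProgX.Base.L.textLo, ProgX.Base.L.textHi] side (v_side)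
  case check_1054f9 =>
    -- 0x1054f9, gif_driver.c:122: the check of the load `map->Colors`: inside the map object `(mp.obj, 24)`
    have hun : ShadowUntouched v.mem s_1054f9.mem := by v_untouched
    exact hlo.accSmall hat.inv.shadow hun _ 8 (by decide) (by u_omega) (by u_omega)
  case check_10550c =>
    -- 0x10550c, gif_driver.c:122: the check of the load `Colors[i].Red`: inside the colour array `(mp.colors, 3 · mp.count)`
    have hlt : i < mp.count := (cnt32_slt_iff i mp.count hi31 hcnt31).mp hbr_105556
    have hun : ShadowUntouched v.mem s_10550c.mem := by v_untouched
    exact hlc.accSmall hat.inv.shadow hun _ 1 (by decide) (by u_omega) (by u_omega)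
  case call_inv =>
    v_inv
  case pre_105517 =>
    trivial
  · -- 4. 0x10551c: THE FIRST digest_byte HAS RETURNED; it wrote nothing (its post: the memory is the one at its entry): `w_mem` is
    -- restated from the post and the returned state behaves like straight code (no `u_frame` per slot, no footprint bookkeeping)
    have hlt : i < mp.count := (cnt32_slt_iff i mp.count hi31 hcnt31).mp hbr_105556
    v_after_call w_rsp_105517 w_mem_105517
    have w_mem : s_105517r.mem = s_105517.mem := w_post
    rw [w_mem_105517] at w_mem
    clear w_same w_post
    u_walk hcode [hμ.vendor]
      until [Gif.L.digest_map.at_105553, Gif.L.digest_map.at_105558]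
      span [ProgX.Base.L.textLo, ProgX.Base.L.textHi] side (v_side)
    case check_105523 =>
      -- 0x105523: the check of the load `Colors[i].Green`: inside the colour array
      have hun : ShadowUntouched v.mem s_105523.mem := by v_untouched
      exact hlc.accSmall hat.inv.shadow hun _ 1 (by decide) (by u_omega) (by u_omega)
    case call_inv =>
      v_inv
    case pre_10552f =>
      trivial
    -- 0x105534: digest_byte has returned
    v_after_call w_rsp_10552f w_mem_10552f
    have w_mem : s_10552fr.mem = s_10552f.mem := w_post
    rw [w_mem_10552f] at w_mem
    clear w_same w_post
    u_walk hcode [hμ.vendor]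
      until [Gif.L.digest_map.at_105553, Gif.L.digest_map.at_105558]
      span [ProgX.Base.L.textLo, ProgX.Base.L.textHi] side (v_side)
    case check_10553b =>
      -- 0x10553b: the check of the load `Colors[i].Blue`: inside the colour array
      have hun : ShadowUntouched v.mem s_10553b.mem := by v_untouched
      exact hlc.accSmall hat.inv.shadow hun _ 1 (by decide) (by u_omega) (by u_omega)
    case call_inv =>
      v_inv
    case pre_105547 =>
      trivial
    -- 0x10554c: digest_byte has returned
    v_after_call w_rsp_105547 w_mem_105547
    have w_mem : s_105547r.mem = s_105547.mem := w_post
    rw [w_mem_105547] at w_mem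
    clear w_same w_post
    u_walk hcode [hμ.vendor]
      until [Gif.L.digest_map.at_105553, Gif.L.digest_map.at_105558]
      span [ProgX.Base.L.textLo, ProgX.Base.L.textHi] side (v_side)
    -- 5a. 0x10554f → 0x105553 (gif_driver.c:121, `i++`): BACK AT THE HEAD, `Head (k − 1)`: `At` by `digest_map.At.carry`
    have hun : ShadowUntouched v.mem s_10554f.mem := by v_untouched
    have hsame : Mem.SameExcept [⟨(e.reg .rsp).toNat - 64, (e.reg .rsp).toNat - 40⟩] v.mem s_10554f.mem := by
      rw [w_mem]
      u_same
    have habi : (conv u₀).inv s_10554f := by v_inv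
    have hat' := hat.carry (cut' := Gif.L.digest_map.at_105553) w_rip w_rsp (w_kept.get .r15 rfl)
      (ProgX.Base.conv_code_in w_eq) habi hun hsame
    refine ReachVia.done (Or.inl ⟨k - 1, by omega, hat', mp, rfl, ?_, ?_, ?_, ?_, ?_⟩)
    · -- r13 = map: not written
      rw [w_kept.get .r13 rfl]
      exact h_r13
    · -- the map's fields: the map object is off the stack
      refine hmap0.sameExcept hsame (by omega) ?_
      intro w hw
      have hw_eq := List.mem_singleton.mp hw
      rw [hw_eq]
      right
      show (e.reg .rsp).toNat - 40 ≤ mp.obj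
      omega
    · -- r14 = ColorCount: not written
      rw [w_kept.get .r14 rfl]
      exact h_r14
    · -- r12 = i + 1 ≤ ColorCount
      rw [w_r12, Gif.Spec.cnt32_succ i (by omega), toNat_ofNat_addr (i + 1) (by omega)]
      omega
    · -- the measure
      rw [w_r12, Gif.Spec.cnt32_succ i (by omega), toNat_ofNat_addr (i + 1) (by omega)]
      omega
  · -- 5b. 0x105558 (gif_driver.c:127): `i ≥ ColorCount`, THE EXIT: `Done`; nothing was stored
    have hun : ShadowUntouched v.mem s_105556.mem := by v_untouched
    have hsame : Mem.SameExcept [⟨(e.reg .rsp).toNat - 64, (e.reg .rsp).toNat - 40⟩] v.mem s_105556.mem := by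
      rw [w_mem]
      exact Mem.SameExcept.refl _ _
    have habi : (conv u₀).inv s_105556 := by v_inv
    have hat' := hat.carry (cut' := Gif.L.digest_map.at_105558) w_rip w_rsp (w_kept.get .r15 rfl)
      (ProgX.Base.conv_code_in w_eq) habi hun hsame
    exact ReachVia.done (Or.inr ⟨hat'⟩)
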